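-- pv_equiv track=rewrite | github.com/Hybrid-Gym/Hybrid-Gym | evaluation/benchmarks/hybrid_gym_func_localize/eval_localize.py | check_lines_in_function_range
-- ===== SOURCE A (Python) =====
-- def check_lines_in_function_range(
--     added_line_numbers: list[int],
--     module_line_start: int,
--     module_line_end: int
-- ) -> bool:
--     """
--     Check if all added line numbers are within the function/class range.
--
--     Args:
--         added_line_numbers: List of line numbers where content was added
--         module_line_start: Start line of the target function/class (0-indexed in data)
--         module_line_end: End line of the target function/class (0-indexed in data)
--
--     Returns:
--         bool: True if all added lines are within range, False otherwise
--     """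
--     if not added_line_numbers:
--         return False
--
--     # Convert from 0-indexed (data) to 1-indexed (git diff)
--     start = module_line_start + 1
--     end = module_line_end + 1
--
--     for line_num in added_line_numbers:
--         if not (start <= line_num <= end):
--             return False
--     return True
-- ===== SOURCE B (Python) =====
-- def check_lines_in_function_range(
--     added_line_numbers: list[int],
--     module_line_start: int,
--     module_line_end: int
-- ) -> bool:
--     ordered = sorted(added_line_numbers)
--     if not ordered:
--         return False
--     # After sorting, only the two extreme positions need to be inspected.
--     return (module_line_start + 1 <= ordered[0]
--             and ordered[-1] <= module_line_end + 1)
-- ===== Notes on version B (the rewrite author's own statement) =====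
-- stated objective: alternative
-- what changed: Sorts the list once and decides the predicate by inspecting only the first and last element of the sorted list, instead of testing every element against the range.
import Mathlib
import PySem

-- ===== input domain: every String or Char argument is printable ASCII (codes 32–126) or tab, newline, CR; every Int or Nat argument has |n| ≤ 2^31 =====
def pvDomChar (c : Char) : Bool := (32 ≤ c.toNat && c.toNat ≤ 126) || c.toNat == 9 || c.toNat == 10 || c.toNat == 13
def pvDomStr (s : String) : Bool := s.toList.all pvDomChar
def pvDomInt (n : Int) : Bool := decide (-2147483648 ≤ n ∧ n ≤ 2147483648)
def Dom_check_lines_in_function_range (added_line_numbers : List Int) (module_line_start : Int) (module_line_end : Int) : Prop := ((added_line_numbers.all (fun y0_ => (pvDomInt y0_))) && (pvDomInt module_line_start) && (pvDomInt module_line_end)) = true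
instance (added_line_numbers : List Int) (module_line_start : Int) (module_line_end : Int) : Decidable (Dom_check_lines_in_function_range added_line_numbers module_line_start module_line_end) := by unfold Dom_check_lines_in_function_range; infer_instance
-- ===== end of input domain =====

-- ===== PORT A =====
-- B sorts once and inspects only the two extreme positions of the sorted list (alternative decomposition, no speed claim).
def pvCheckLoop (start stop : Int) : List Int → Bool
  | [] => true
  | x :: xs => if start ≤ x ∧ x ≤ stop then pvCheckLoop start stop xs else false

def check_lines_in_function_range (added_line_numbers : List Int) (module_line_start : Int) (module_line_end : Int) : Bool :=
  match added_line_numbers with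
  | [] => false
  | _ :: _ =>
    let start := module_line_start + 1
    let stop := module_line_end + 1
    pvCheckLoop start stop added_line_numbers

-- ===== PORT B =====
def check_lines_in_function_range_alt (added_line_numbers : List Int) (module_line_start : Int) (module_line_end : Int) : Bool :=
  match PySem.List.sorted added_line_numbers (fun x => x) false with
  | [] => false
  | a :: rest =>
    decide (module_line_start + 1 ≤ a) &&
    decide ((a :: rest).getLast (List.cons_ne_nil a rest) ≤ module_line_end + 1)

-- ===== PRECONDITION & SPEC =====
def Spec_check_lines_in_function_range (added_line_numbers : List Int) (module_line_start : Int) (module_line_end : Int) (out : Bool) : Prop := out = check_lines_in_function_range_alt added_line_numbers module_line_start module_line_end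
instance (added_line_numbers : List Int) (module_line_start : Int) (module_line_end : Int) (out : Bool) : Decidable (Spec_check_lines_in_function_range added_line_numbers module_line_start module_line_end out) := by unfold Spec_check_lines_in_function_range; infer_instance

-- ===== CLAIM =====
def Claim_equal_check_lines_in_function_range : Prop := ∀ (added_line_numbers : List Int) (module_line_start : Int) (module_line_end : Int), Dom_check_lines_in_function_range added_line_numbers module_line_start module_line_end → Spec_check_lines_in_function_range added_line_numbers module_line_start module_line_end (check_lines_in_function_range added_line_numbers module_line_start module_line_end)

-- ===== LEMMAS AND PROOFS =====
lemma pv_loop_iff (s e : Int) : ∀ (xs : List Int),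
    (pvCheckLoop s e xs = true ↔ ∀ a ∈ xs, s ≤ a ∧ a ≤ e) := by
  intro xs
  induction xs with
  | nil => simp [pvCheckLoop]
  | cons y ys ih =>
    simp only [pvCheckLoop]
    split_ifs with h
    · simp [ih, h]
    · simp only [List.mem_cons]
      constructor
      · intro hfalse; cases hfalse
      · intro hall; exact absurd (hall y (Or.inl rfl)) h

lemma pv_mem_le_getLast : ∀ (xs : List Int) (h : xs ≠ []),
    xs.Pairwise (· ≤ ·) → ∀ y ∈ xs, y ≤ xs.getLast h := by
  intro xs
  induction xs with
  | nil => intro h; exact absurd rfl h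
  | cons a rest ih =>
    intro _ hp y hy
    cases rest with
    | nil => simp at hy; simp [List.getLast, hy]
    | cons b t =>
      rw [List.getLast_cons (List.cons_ne_nil b t)]
      rcases List.mem_cons.mp hy with rfl | hy'
      · exact le_trans ((List.pairwise_cons.mp hp).1 _ (List.getLast_mem _))
          (le_refl _)
      · exact ih (List.cons_ne_nil b t) (List.pairwise_cons.mp hp).2 y hy'

-- ===== VERDICT =====
theorem check_lines_in_function_range_spec : Claim_equal_check_lines_in_function_range := by
  intro l s e _
  unfold Spec_check_lines_in_function_range
  unfold check_lines_in_function_range check_lines_in_function_range_alt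
  rcases hs : PySem.List.sorted l (fun x => x) false with _ | ⟨a, rest⟩
  · have : l = [] := by
      have := PySem.List.sorted_eq_nil_iff (xs := l) (key := fun x => x) (rev := false)
      exact this.mp hs
    subst this; rfl
  · have hlne : l ≠ [] := by
      intro h; subst h
      have hnil : PySem.List.sorted ([] : List Int) (fun x => x) false = [] :=
        by simp [PySem.List.sorted_eq_nil_iff]
      rw [hnil] at hs; cases hs
    have hperm : (a :: rest).Perm l := hs ▸ PySem.List.sorted_perm l (fun x => x) false
    have hmem : ∀ y, y ∈ a :: rest ↔ y ∈ l := fun y => hperm.mem_iff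
    have hpw : (a :: rest).Pairwise (fun x y => x ≤ y) := by
      have := PySem.List.sorted_pairwise (xs := l) (key := fun x => x)
      rw [hs] at this; exact this
    have hhead : ∀ y ∈ l, a ≤ y := PySem.List.key_head_sorted_le (xs := l) (key := fun x => x) hs
    have hlast : ∀ y ∈ l, y ≤ (a :: rest).getLast (List.cons_ne_nil a rest) := by
      intro y hy
      exact pv_mem_le_getLast _ _ hpw y ((hmem y).mpr hy)
    have hlastmem : (a :: rest).getLast (List.cons_ne_nil a rest) ∈ l :=
      (hmem _).mp (List.getLast_mem _)
    have hamem : a ∈ l := (hmem a).mp (List.mem_cons_self)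
    rcases l with _ | ⟨x, xs⟩
    · exact absurd rfl hlne
    · rw [Bool.eq_iff_iff]
      simp only [Bool.and_eq_true, decide_eq_true_eq]
      rw [pv_loop_iff]
      constructor
      · intro h
        exact ⟨(h a hamem).1, (h _ hlastmem).2⟩
      · rintro ⟨h1, h2⟩ y hy
        exact ⟨le_trans h1 (hhead y hy), le_trans (hlast y hy) h2⟩
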